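-- pv_equiv track=rewrite | github.com/Giulio899/SDChessReferee | SDChessRefereePython/chessRecognition/main2.py | format_squares_piece_text
-- ===== SOURCE A (Python) =====
-- def format_squares_piece_text(sq_pc):
--     """
--     Pretty print board layout
--     """
--     i = 0
--     sq_pc_formatted = []
--     for pc in sq_pc:
--         i += 1
--         sq_pc_formatted.append(pc)
--         sq_pc_formatted.append(' ')
--         if i % 8 == 0:
--             sq_pc_formatted.append('\n')
--
--     return ''.join(sq_pc_formatted)
-- ===== SOURCE B (Python) =====
-- def format_squares_piece_text(sq_pc):
--     """
--     Pretty print board layout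
--     """
--     xs = list(sq_pc)
--     parts = []
--     for start in range(0, len(xs), 8):
--         chunk = xs[start:start + 8]
--         parts.append(''.join(p + ' ' for p in chunk))
--         if len(chunk) == 8:
--             parts.append('\n')
--     return ''.join(parts)
-- ===== Notes on version B (the rewrite author's own statement) =====
-- stated objective: alternative
-- what changed: Replaced the flat per-element loop with a modulo-8 counter that decides newline insertion by a while-loop that peels 8-element chunks off the front with slices, joins each chunk's pieces, and appends a newline exactly for full chunks.
import Mathlib
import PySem

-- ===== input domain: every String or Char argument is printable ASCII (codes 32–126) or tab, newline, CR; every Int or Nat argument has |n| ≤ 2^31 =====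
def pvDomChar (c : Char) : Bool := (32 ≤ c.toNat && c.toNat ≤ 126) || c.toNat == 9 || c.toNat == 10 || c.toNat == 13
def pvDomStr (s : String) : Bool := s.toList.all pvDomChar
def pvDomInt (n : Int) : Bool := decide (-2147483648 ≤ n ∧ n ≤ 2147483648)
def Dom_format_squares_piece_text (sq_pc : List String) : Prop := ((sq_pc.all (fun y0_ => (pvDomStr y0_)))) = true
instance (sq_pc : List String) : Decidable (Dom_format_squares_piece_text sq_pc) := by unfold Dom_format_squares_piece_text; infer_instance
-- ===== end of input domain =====

-- B replaces A's flat per-element loop with a modulo-8 counter by a loop that peels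
-- 8-element chunks off the front with slices (objective: alternative decomposition, same cost).

-- ===== PORT A =====
-- step of A's for-loop: state is (i, sq_pc_formatted)
def fmtAStep (st : Int × List String) (pc : String) : Int × List String :=
  let i := st.1 + 1
  let acc := st.2 ++ [pc] ++ [" "]
  if i % 8 == 0 then (i, acc ++ ["\n"]) else (i, acc)

def format_squares_piece_text (sq_pc : List String) : String :=
  PySem.Str.join "" (sq_pc.foldl fmtAStep (0, [])).2

-- ===== PORT B =====
-- slice facts cited by fmtBLoop's decreasing_by
theorem slice_from_8 (xs : List String) : PySem.List.slice xs (some 8) none = xs.drop 8 := by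
  rw [show (8:Int) = ((8:Nat):Int) by norm_num, PySem.List.slice_from_natCast]

-- ''.join(p + ' ' for p in chunk)
def fmtBChunk (chunk : List String) : String :=
  PySem.Str.join "" (chunk.map (fun p => p ++ " "))

-- B's while-loop: chunk = xs[:8], xs = xs[8:], append the chunk string (and '\n' if full)
def fmtBLoop (xs parts : List String) : List String :=
  if h : xs = [] then parts
  else
    fmtBLoop (PySem.List.slice xs (some 8) none)
      (parts ++ [fmtBChunk (PySem.List.slice xs none (some 8))] ++
        (if (PySem.List.slice xs none (some 8)).length == 8 then ["\n"] else []))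
termination_by xs.length
decreasing_by
  rw [slice_from_8]
  have : xs.length ≠ 0 := by simpa [List.length_eq_zero_iff] using h
  simp
  omega

def format_squares_piece_text_alt (sq_pc : List String) : String :=
  PySem.Str.join "" (fmtBLoop sq_pc [])

-- ===== PRECONDITION & SPEC =====
def Spec_format_squares_piece_text (sq_pc : List String) (out : String) : Prop := out = format_squares_piece_text_alt sq_pc
instance (sq_pc : List String) (out : String) : Decidable (Spec_format_squares_piece_text sq_pc out) := by unfold Spec_format_squares_piece_text; infer_instance

-- ===== CLAIM (what is proved, stated in full; the proofs are below) =====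
def Claim_equal_format_squares_piece_text : Prop := ∀ (sq_pc : List String), Dom_format_squares_piece_text sq_pc → Spec_format_squares_piece_text sq_pc (format_squares_piece_text sq_pc)

-- ===== LEMMAS AND PROOFS =====

theorem slice_to_8 (xs : List String) : PySem.List.slice xs none (some 8) = xs.take 8 := by
  rw [show (8:Int) = ((8:Nat):Int) by norm_num, PySem.List.slice_to_natCast]

-- characters of a list of string parts, as ''.join sees them
def pvChars (parts : List String) : List Char := (parts.map String.toList).flatten

theorem join_nil_eq_flatten (l : List (List Char)) : PySem.Chars.join [] l = l.flatten := by
  induction l with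
  | nil => simp [PySem.Chars.join_nil]
  | cons a t ih =>
    cases t with
    | nil => simp [PySem.Chars.join_singleton]
    | cons b u => rw [PySem.Chars.join_cons_cons, ih]; simp

theorem toList_join_empty (parts : List String) :
    (PySem.Str.join "" parts).toList = pvChars parts := by
  simp [PySem.Str.toList_join, pvChars, join_nil_eq_flatten]

-- A's loop over a stretch that hits no multiple of 8: plain interleave with spaces
theorem foldA_run (chunk : List String) (c : Int) (acc : List String)
    (h : ∀ j : Nat, j < chunk.length → (c + 1 + j) % 8 ≠ 0) :
    chunk.foldl fmtAStep (c, acc)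
      = (c + chunk.length, acc ++ chunk.flatMap (fun p => [p, " "])) := by
  induction chunk generalizing c acc with
  | nil => simp
  | cons a t ih =>
    have h0 : (c + 1) % 8 ≠ 0 := by simpa using h 0 (by simp)
    have hrec := ih (c + 1) (acc ++ [a] ++ [" "]) (by
      intro j hj
      have := h (j + 1) (by simp; omega)
      push_cast at this ⊢
      omega)
    simp only [List.foldl_cons, fmtAStep, beq_iff_eq, if_neg h0]
    rw [hrec]
    simp only [Prod.mk.injEq]
    refine ⟨by push_cast [List.length_cons]; omega, by simp⟩

-- A's fold accumulator is an append accumulator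
theorem foldA_acc (xs : List String) (c : Int) (acc : List String) :
    (xs.foldl fmtAStep (c, acc)).2 = acc ++ (xs.foldl fmtAStep (c, [])).2 := by
  induction xs generalizing c acc with
  | nil => simp
  | cons a t ih =>
    simp only [List.foldl_cons, fmtAStep, beq_iff_eq, List.nil_append]
    by_cases h : (c + 1) % 8 = 0
    · simp only [if_pos h]
      rw [ih (c+1) (acc ++ [a] ++ [" "] ++ ["\n"]), ih (c+1) ([a] ++ [" "] ++ ["\n"])]
      simp
    · simp only [if_neg h]
      rw [ih (c+1) (acc ++ [a] ++ [" "]), ih (c+1) ([a] ++ [" "])]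
      simp

-- B's loop accumulator is an append accumulator
theorem fmtBLoop_acc (xs parts : List String) :
    fmtBLoop xs parts = parts ++ fmtBLoop xs [] := by
  induction hn : xs.length using Nat.strong_induction_on generalizing xs parts with
  | _ n ih =>
    by_cases hx : xs = []
    · subst hx
      rw [fmtBLoop.eq_def (xs := []) (parts := parts), fmtBLoop.eq_def (xs := []) (parts := [])]
      simp
    · rw [fmtBLoop.eq_def, dif_neg hx, fmtBLoop.eq_def (xs := xs) (parts := []), dif_neg hx]
      have hrest : (PySem.List.slice xs (some 8) none).length < n := by
        rw [slice_from_8]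
        have : xs.length ≠ 0 := by simpa [List.length_eq_zero_iff] using hx
        subst hn; simp; omega
      rw [ih _ hrest _ _ rfl, ih _ hrest _
        ([] ++ [fmtBChunk (PySem.List.slice xs none (some 8))] ++
          (if (PySem.List.slice xs none (some 8)).length == 8 then ["\n"] else [])) rfl]
      simp

-- the chunk string B builds has exactly the characters A appends for that chunk
theorem chunk_chars (chunk : List String) :
    pvChars [fmtBChunk chunk] = pvChars (chunk.flatMap (fun p => [p, " "])) := by
  simp only [pvChars, fmtBChunk, List.map_cons, List.map_nil, List.flatten_cons,
    List.flatten_nil, List.append_nil, toList_join_empty, pvChars]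
  induction chunk with
  | nil => simp
  | cons a t ih => simp at ih ⊢; rw [← ih]

-- main induction: from a counter that is a nonnegative multiple of 8, A's remaining
-- output has the same characters as B's loop on the remaining list
theorem main_chars (xs : List String) (c : Int) (hc : c % 8 = 0) (hpos : 0 ≤ c) :
    pvChars (xs.foldl fmtAStep (c, [])).2 = pvChars (fmtBLoop xs []) := by
  induction hn : xs.length using Nat.strong_induction_on generalizing xs c with
  | _ n ih =>
    by_cases hx : xs = []
    · rw [fmtBLoop.eq_def]; simp [hx]
    · rw [fmtBLoop.eq_def, dif_neg hx, slice_from_8, slice_to_8]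
      by_cases hlen : xs.length < 8
      · -- final short chunk: no newline fires, B's loop ends after this chunk
        have hnl : ∀ j : Nat, j < xs.length → (c + 1 + j) % 8 ≠ 0 := by
          intro j hj
          have hj7 : (j:Int) < 7 := by exact_mod_cast (by omega : j < 7)
          omega
        rw [foldA_run xs c [] hnl]
        have htake : xs.take 8 = xs := List.take_of_length_le (by omega)
        have hdrop : xs.drop 8 = ([] : List String) := by simp; omega
        rw [htake, hdrop, if_neg (by simp; omega)]
        rw [fmtBLoop.eq_def, dif_pos rfl]
        have := chunk_chars xs
        simp only [pvChars, List.map_cons, List.map_nil, List.flatten_cons, List.flatten_nil,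
          List.append_nil, List.nil_append] at this ⊢
        rw [← this]
      · -- full chunk of 8: 7 quiet elements, the 8th appends '\n', recurse on the rest
        have hlen8 : 8 ≤ xs.length := by omega
        have hlen7 : (xs.take 7).length = 7 := by simp; omega
        have hx8 : 7 < xs.length := by omega
        have hdrop7 : xs.drop 7 = xs[7]'hx8 :: xs.drop 8 := by
          rw [List.drop_eq_getElem_cons hx8]
        have hsplit : xs = xs.take 7 ++ ([xs[7]'hx8] ++ xs.drop 8) := by
          conv_rhs => rw [List.singleton_append, ← hdrop7, List.take_append_drop]
        have hnl : ∀ j : Nat, j < (xs.take 7).length → (c + 1 + j) % 8 ≠ 0 := by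
          intro j hj
          rw [hlen7] at hj
          have hj7 : (j:Int) < 7 := by exact_mod_cast hj
          omega
        conv_lhs => rw [hsplit, List.foldl_append, foldA_run (xs.take 7) c [] hnl]
        have h8 : ((c + ↑(xs.take 7).length) + 1) % 8 = 0 := by
          rw [hlen7]; omega
        rw [List.singleton_append, List.foldl_cons]
        simp only [List.nil_append, fmtAStep, beq_iff_eq, if_pos h8]
        rw [foldA_acc]
        -- B's side
        rw [if_pos (by simp; omega), fmtBLoop_acc]
        have hs1 : (" " : String).toList = [' '] := by decide
        have hs2 : ("\n" : String).toList = ['\n'] := by decide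
        have hrec := ih (xs.drop 8).length (by subst hn; simp; omega) (xs.drop 8)
          (c + ↑(xs.take 7).length + 1) (by rw [hlen7]; omega) (by rw [hlen7]; omega) rfl
        have htake8 : xs.take 8 = xs.take 7 ++ [xs[7]'hx8] := by
          rw [List.take_add_one]
          simp [List.getElem?_eq_getElem hx8]
        have hcc := chunk_chars (xs.take 8)
        rw [htake8] at hcc
        simp only [pvChars, List.map_cons, List.map_nil, List.map_append, List.flatten_cons,
          List.flatten_nil, List.flatten_append, List.append_nil,
          List.flatMap_append, List.flatMap_cons, List.flatMap_nil, hs1, hs2] at hcc hrec ⊢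
        rw [← htake8] at hcc
        rw [hcc, hrec]
        simp

-- ===== VERDICT (by name: the statement is the Claim_ definition above) =====
theorem format_squares_piece_text_spec : Claim_equal_format_squares_piece_text := by
  intro sq_pc _
  unfold Spec_format_squares_piece_text format_squares_piece_text format_squares_piece_text_alt
  apply String.toList_injective
  rw [toList_join_empty, toList_join_empty]
  exact main_chars sq_pc 0 rfl le_rfl
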